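-- pv_equiv track=rewrite | github.com/octaprog7/seg_displays | lib_displays/char_display_mod.py | gen_chars_with_dp
-- ===== SOURCE A (Python) =====
-- def gen_chars_with_dp(input_str: str):
--     """Генератор, который перебирает строку символов input_str и выдаёт по одному элементу — либо одиночный символ,
--     либо символ с десятичной точкой (DP) в виде объединённой строки длиной 2 (например 'А.').
--
--     Каждый элемент соответствует одному знаку для семисегментного индикатора с учётом десятичной точки.
--
--     Алгоритм:
--         - Последовательно принимает символы из входной строки.
--         - Собирает символы в буфер по два.
--         - Если второй символ — точка '.', объединяет её с первым символом и выдаёт как один элемент (например, 'A.').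
--         - Если второй символ не точка, то выдаёт первый символ отдельно.
--         - Если первый символ — одиночная точка '.', она тоже выдаётся как отдельный элемент.
--         - В конце, если остался непереданный символ, он тоже отдаётся.
--
--     Использование:
--         - Помогает разбить строку с условным указанием десятичной точки в виде символа '.' сразу после основного символа.
--         - Результат удобно передавать в функцию преобразования символов в коды для семисегментных индикаторов, учитывающих DP.
--
--     Аргументы:
--         input_string (str): Входная строка с символами и, опционально, десятичными точками, указанными как '.' после символа
--         reverse_order: Если Истина, то строка происходит обход символов 'перевернутой' input_string
--
--     Результат:
--         Итератор[str]: Последовательность строк длиной 1 (символ без DP) или 2 (символ+'.' для DP)."""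
--
--     buffer = ['', '']  # массив из двух символов
--     count = 0  # счётчик заполненных позиций (0 или 1)
--     decimal_point = '.'
--
--     for ch in input_str:
--         buffer[count] = ch
--         count += 1
--
--         if count == 2:
--             if buffer[1] == decimal_point:
--                 yield buffer[0] + buffer[1]
--                 count = 0
--             else:
--                 if buffer[0] == decimal_point:
--                     yield decimal_point
--                 else:
--                     yield buffer[0]
--                 buffer[0] = buffer[1]
--                 count = 1
--
--     # После цикла проверяем, остался ли символ в буфере (count == 1)
--     if 1 == count:
--         yield buffer[0]
-- ===== SOURCE B (Python) =====
-- import re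
--
-- def gen_chars_with_dp(input_str: str):
--     # Each element is any one character plus an optional trailing '.'.
--     yield from re.findall(r'.\.?', input_str, re.DOTALL)
-- ===== Notes on version B (the rewrite author's own statement) =====
-- stated objective: idiomatic
-- what changed: Replaced the explicit two-slot buffer/count state machine with a single regex findall (any one character followed by an optional dot, with DOTALL), which expresses the merge rule directly.
import Mathlib
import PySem

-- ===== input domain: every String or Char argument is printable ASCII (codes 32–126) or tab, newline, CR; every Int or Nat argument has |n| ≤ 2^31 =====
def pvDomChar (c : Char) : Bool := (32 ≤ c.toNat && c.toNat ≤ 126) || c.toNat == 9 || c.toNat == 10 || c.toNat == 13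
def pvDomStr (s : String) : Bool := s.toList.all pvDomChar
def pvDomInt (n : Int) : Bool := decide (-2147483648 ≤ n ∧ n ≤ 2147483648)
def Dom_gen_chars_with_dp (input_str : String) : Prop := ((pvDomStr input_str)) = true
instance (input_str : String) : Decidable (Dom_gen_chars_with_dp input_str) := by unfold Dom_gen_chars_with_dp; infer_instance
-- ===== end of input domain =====

-- ===== PORT A =====
-- B replaces A's two-slot buffer/count state machine with a regex findall of `.\.?`;
-- objective: idiomatic. Both yield each character with an optional trailing '.'.
-- A's buffer cells are initialised to '' in Python but are never read before being
-- written (count guards every read), so a dummy ' ' initial char is exact.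
def pvGenA : List Char → Char → Char → Nat → List String
  | [], b0, _, count => if count = 1 then [String.mk [b0]] else []
  | ch :: rest, b0, b1, count =>
    -- buffer[count] = ch; count += 1
    let b0' := if count = 0 then ch else b0
    let b1' := if count = 0 then b1 else ch
    let count' := count + 1
    if count' = 2 then
      if b1' = '.' then
        (String.mk [b0', b1']) :: pvGenA rest b0' b1' 0
      else
        (if b0' = '.' then "." else String.mk [b0']) :: pvGenA rest b1' b1' 1
    else
      pvGenA rest b0' b1' count'

def gen_chars_with_dp (input_str : String) : List String :=
  pvGenA input_str.toList ' ' ' ' 0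

-- ===== PORT B =====
-- port of re.findall(r'.\.?', s, re.DOTALL): repeatedly match one char plus optional '.'
def pvGenB : List Char → List String
  | [] => []
  | [c] => [String.mk [c]]
  | c :: d :: rest =>
    if d = '.' then String.mk [c, '.'] :: pvGenB rest
    else String.mk [c] :: pvGenB (d :: rest)

def gen_chars_with_dp_alt (input_str : String) : List String :=
  pvGenB input_str.toList

-- ===== PRECONDITION & SPEC =====
def Spec_gen_chars_with_dp (input_str : String) (out : List String) : Prop := out = gen_chars_with_dp_alt input_str
instance (input_str : String) (out : List String) : Decidable (Spec_gen_chars_with_dp input_str out) := by unfold Spec_gen_chars_with_dp; infer_instance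

-- ===== CLAIM (what is proved, stated in full; the proofs are below) =====
def Claim_equal_gen_chars_with_dp : Prop := ∀ (input_str : String), Dom_gen_chars_with_dp input_str → Spec_gen_chars_with_dp input_str (gen_chars_with_dp input_str)

-- ===== LEMMAS AND PROOFS =====

-- With one char c pending in the buffer, A's loop produces exactly B's output on c :: l.
theorem pvGenA_one : ∀ (n : Nat) (l : List Char), l.length ≤ n →
    ∀ (c x : Char), pvGenA l c x 1 = pvGenB (c :: l) := by
  intro n
  induction n with
  | zero =>
    intro l hl c x
    cases l with
    | nil => simp [pvGenA, pvGenB]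
    | cons d rest => simp at hl
  | succ n ih =>
    intro l hl c x
    cases l with
    | nil => simp [pvGenA, pvGenB]
    | cons d rest =>
      simp only [List.length_cons] at hl
      by_cases hd : d = '.'
      · subst hd
        have hrest : pvGenA rest c '.' 0 = pvGenB rest := by
          cases rest with
          | nil => simp [pvGenA, pvGenB]
          | cons e r =>
            have : pvGenA (e :: r) c '.' 0 = pvGenA r e '.' 1 := by
              simp [pvGenA]
            rw [this, ih r (by simp at hl; omega) e '.']
        simp [pvGenA, pvGenB, hrest]
      · have := ih rest (by omega) d d
        by_cases hc : c = '.'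
        · subst hc
          simp [pvGenA, pvGenB, hd, this]
          rfl
        · simp [pvGenA, pvGenB, hd, hc, this]

theorem pvGenA_eq_pvGenB (l : List Char) (x y : Char) : pvGenA l x y 0 = pvGenB l := by
  cases l with
  | nil => simp [pvGenA, pvGenB]
  | cons c rest =>
    have : pvGenA (c :: rest) x y 0 = pvGenA rest c y 1 := by simp [pvGenA]
    rw [this, pvGenA_one rest.length rest le_rfl c y]

-- ===== VERDICT (by name: the statement is the Claim_ definition above) =====
theorem gen_chars_with_dp_spec : Claim_equal_gen_chars_with_dp := by
  intro s _
  unfold Spec_gen_chars_with_dp gen_chars_with_dp gen_chars_with_dp_alt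
  exact pvGenA_eq_pvGenB _ _ _
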